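-- pv_equiv track=rewrite | github.com/calvinnor/DailyCodingProblem | 2018/December/18-parenthesis-mismatch.py | countInvalidParenthesis
-- ===== SOURCE A (Python) =====
-- def countInvalidParenthesis(inputStr):
--     '''
--     We'll use a Stack for this problem.
--
--     Iterating over the input, we'll check what the incoming character is.
--
--     If we find an opening '(' then we simply push into the stack.
--     Else if we find a closing ')' then we check the top of the stack.
--         If the top contains a '(' then this parenthesis pair is complete, pop the top.
--         Else, append this to the stack.
--
--     The total elements (count) at the end in the stack is the number of mismatched elements.
--     '''
--
--     # Using a List as a Stack since it allows #append and #pop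
--     symbolStack = []
--
--     for symbol in inputStr:
--
--         if symbol is '(':
--             symbolStack.append(symbol)
--             continue
--
--         elif symbol is ')':
--             if not symbolStack:             # An empty list is falsy
--                 symbolStack.append(symbol)
--                 continue
--
--             # List indexing: -1 is last element
--             stackTop = symbolStack[-1]
--
--             # If we've found an opening parenthesis for this
--             if stackTop is '(':
--                 symbolStack.pop()
--                 continue
--
--             # No match, add to stack
--             else:
--                 symbolStack.append(symbol)
--
--         else:
--             raise Exception("Invalid symbol:", symbol)
--
--     return len(symbolStack)
-- ===== SOURCE B (Python) =====
-- def countInvalidParenthesis(inputStr):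
--     # A different algorithm: string rewriting to a normal form.
--     # First validate the alphabet (same exception as A), then repeatedly
--     # delete every '()' substring until the string is irreducible; the
--     # irreducible remainder has the shape ')))...(((', and its length is
--     # exactly the number of mismatched parentheses.
--     for symbol in inputStr:
--         if symbol != '(' and symbol != ')':
--             raise Exception("Invalid symbol:", symbol)
--     s = inputStr
--     while '()' in s:
--         s = s.replace('()', '')
--     return len(s)
-- ===== Notes on version B (the rewrite author's own statement) =====
-- stated objective: alternative
-- what changed: B abandons the stack simulation entirely: it rewrites the string to a normal form by repeatedly deleting every '()' substring until none remains, and returns the length of the irreducible remainder.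
import Mathlib
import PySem

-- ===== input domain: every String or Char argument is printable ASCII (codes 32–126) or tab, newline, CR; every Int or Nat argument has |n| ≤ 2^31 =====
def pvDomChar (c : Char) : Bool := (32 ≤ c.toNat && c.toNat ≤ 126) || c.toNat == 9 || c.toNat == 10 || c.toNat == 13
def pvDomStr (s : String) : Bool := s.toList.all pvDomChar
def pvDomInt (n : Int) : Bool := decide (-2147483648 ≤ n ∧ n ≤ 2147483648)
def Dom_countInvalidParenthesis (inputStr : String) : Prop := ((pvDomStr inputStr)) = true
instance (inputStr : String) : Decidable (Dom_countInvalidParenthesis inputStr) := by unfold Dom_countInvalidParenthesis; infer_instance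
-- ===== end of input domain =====

-- B replaces A's stack simulation with string rewriting: repeatedly delete every '()'
-- substring until irreducible, then return the remainder's length (objective: alternative).
-- Both programs raise on any symbol other than '(' / ')', so Pre_ admits only paren strings.

-- ===== PORT A =====
-- one step of A's loop on the stack (appends/pops at the END of the list, like Python's list)
def pvStepA (st : List Char) (symbol : Char) : List Char :=
  if symbol = '(' then st ++ ['(']
  else if symbol = ')' then
    match st.getLast? with
    | none => st ++ [')']                  -- "if not symbolStack"
    | some stackTop =>
      if stackTop = '(' then st.dropLast   -- pop the matched '('
      else st ++ [')']
  else st                                  -- Python raises Exception here; excluded by Pre_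

def countInvalidParenthesis (inputStr : String) : Int :=
  ((inputStr.toList.foldl pvStepA []).length : Int)

-- ===== PORT B =====
-- s.replace('()', '') : one left-to-right pass deleting every (disjoint) '()' occurrence
def pvRepl : List Char → List Char
  | [] => []
  | [c] => [c]
  | c :: d :: rest => if c = '(' ∧ d = ')' then pvRepl rest else c :: pvRepl (d :: rest)

-- '()' in s
def pvHasPair : List Char → Bool
  | [] => false
  | [_] => false
  | c :: d :: rest => (c = '(' && d = ')') || pvHasPair (d :: rest)

theorem pvRepl_length_le (l : List Char) : (pvRepl l).length ≤ l.length := by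
  induction l using pvRepl.induct with
  | case1 => simp [pvRepl]
  | case2 => simp [pvRepl]
  | case3 c d rest hp ih => simp only [pvRepl, if_pos hp]; simp; omega
  | case4 c d rest hp ih => simp only [pvRepl, if_neg hp]; simp at ih ⊢; omega

theorem pvRepl_length_lt (l : List Char) (h : pvHasPair l = true) :
    (pvRepl l).length < l.length := by
  induction l using pvRepl.induct with
  | case1 => simp [pvHasPair] at h
  | case2 => simp [pvHasPair] at h
  | case3 c d rest hp ih =>
    have := pvRepl_length_le rest
    simp only [pvRepl, if_pos hp]; simp; omega
  | case4 c d rest hp ih =>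
    have h' : pvHasPair (d :: rest) = true := by
      by_cases hc : c = '(' <;> by_cases hd : d = ')'
      · exact absurd ⟨hc, hd⟩ hp
      all_goals simpa [pvHasPair, hc, hd] using h
    have := ih h'
    simp only [pvRepl, if_neg hp]; simp at this ⊢; omega

-- the while loop: rewrite until no '()' remains
def pvReduce (l : List Char) : List Char :=
  if hp : pvHasPair l = true then pvReduce (pvRepl l) else l
termination_by l.length
decreasing_by exact pvRepl_length_lt l hp

def countInvalidParenthesis_alt (inputStr : String) : Int :=
  ((pvReduce inputStr.toList).length : Int)

-- ===== PRECONDITION & SPEC =====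
-- Pre_ excludes exactly the inputs containing a symbol other than '(' or ')', on which
-- both A and B raise Exception("Invalid symbol:", symbol).
def Pre_countInvalidParenthesis (inputStr : String) : Prop :=
  (inputStr.toList.all (fun c => c == '(' || c == ')')) = true
instance (inputStr : String) : Decidable (Pre_countInvalidParenthesis inputStr) := by
  unfold Pre_countInvalidParenthesis; infer_instance

def pvWitness_countInvalidParenthesis : String := "(()))("

def Spec_countInvalidParenthesis (inputStr : String) (out : Int) : Prop := out = countInvalidParenthesis_alt inputStr
instance (inputStr : String) (out : Int) : Decidable (Spec_countInvalidParenthesis inputStr out) := by unfold Spec_countInvalidParenthesis; infer_instance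

-- ===== CLAIM (what is proved, stated in full; the proofs are below) =====
def Claim_equal_countInvalidParenthesis : Prop := ∀ (inputStr : String), Dom_countInvalidParenthesis inputStr → Pre_countInvalidParenthesis inputStr → Spec_countInvalidParenthesis inputStr (countInvalidParenthesis inputStr)

-- ===== LEMMAS AND PROOFS =====

-- a '(' immediately followed by ')' cancels in A's stack
theorem pvStepA_cancel (st : List Char) : pvStepA (pvStepA st '(') ')' = st := by
  simp [pvStepA]

-- deleting the '()' pairs does not change A's stack computation
theorem foldlA_pvRepl (l : List Char) : ∀ st : List Char,
    List.foldl pvStepA st (pvRepl l) = List.foldl pvStepA st l := by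
  induction l using pvRepl.induct with
  | case1 => intro st; simp [pvRepl]
  | case2 => intro st; simp [pvRepl]
  | case3 c d rest hp ih =>
    intro st
    obtain ⟨hc, hd⟩ := hp
    subst hc; subst hd
    simp [pvRepl, List.foldl_cons, pvStepA_cancel, ih]
  | case4 c d rest hp ih =>
    intro st
    simp only [pvRepl, if_neg hp, List.foldl_cons]
    exact ih (pvStepA st c)

-- pvRepl keeps the alphabet
theorem pvRepl_subset (l : List Char) : ∀ c ∈ pvRepl l, c ∈ l := by
  induction l using pvRepl.induct with
  | case1 => intro c hc; simp [pvRepl] at hc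
  | case2 => intro c hc; simp [pvRepl] at hc; simp [hc]
  | case3 a d rest hp ih =>
    intro c hc
    simp only [pvRepl, if_pos hp] at hc
    have := ih c hc
    simp [this]
  | case4 a d rest hp ih =>
    intro c hc
    simp only [pvRepl, if_neg hp] at hc
    rcases List.mem_cons.mp hc with hc | hc
    · simp [hc]
    · have := ih c hc
      simp at this
      rcases this with h1 | h1 <;> simp [h1]

-- an irreducible paren string is ')'^a ++ '('^b
theorem noPair_shape (l : List Char)
    (hall : ∀ c ∈ l, c = '(' ∨ c = ')') (hnp : pvHasPair l = false) :
    ∃ a b, l = List.replicate a ')' ++ List.replicate b '(' := by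
  induction l with
  | nil => exact ⟨0, 0, rfl⟩
  | cons x xs ih =>
    have hrest : ∀ c ∈ xs, c = '(' ∨ c = ')' := fun c hc => hall c (by simp [hc])
    have hnp' : pvHasPair xs = false := by
      cases xs with
      | nil => simp [pvHasPair]
      | cons d ds =>
        have := hnp
        simp [pvHasPair] at this
        exact this.2
    obtain ⟨a, b, hab⟩ := ih hrest hnp'
    rcases hall x (by simp) with hx | hx
    · -- head '(' : no ')' may follow, so a = 0
      subst hx
      cases a with
      | zero => exact ⟨0, b + 1, by simp [hab, List.replicate_succ]⟩
      | succ k =>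
        exfalso
        have hxs : xs = ')' :: (List.replicate k ')' ++ List.replicate b '(') := by
          simpa [List.replicate_succ] using hab
        rw [hxs] at hnp
        simp [pvHasPair] at hnp
    · subst hx
      exact ⟨a + 1, b, by simp [hab, List.replicate_succ]⟩

-- A's stack grows by one on every ')' when the stack holds only ')'s
theorem foldlA_closes (a : Nat) : ∀ k : Nat,
    List.foldl pvStepA (List.replicate k ')') (List.replicate a ')') = List.replicate (k + a) ')' := by
  induction a with
  | zero => intro k; simp
  | succ n ih =>
    intro k
    have hstep : pvStepA (List.replicate k ')') ')' = List.replicate (k + 1) ')' := by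
      cases k with
      | zero => simp [pvStepA]
      | succ m =>
        simp [pvStepA, List.replicate_succ' (n := m),
          List.replicate_succ' (n := m + 1)]
    rw [List.replicate_succ, List.foldl_cons, hstep, ih (k + 1)]
    congr 1
    omega

-- A's stack grows by one on every '('
theorem foldlA_opens (b : Nat) : ∀ st : List Char,
    List.foldl pvStepA st (List.replicate b '(') = st ++ List.replicate b '(' := by
  induction b with
  | zero => intro st; simp
  | succ n ih =>
    intro st
    rw [List.replicate_succ, List.foldl_cons]
    have hstep : pvStepA st '(' = st ++ ['('] := by simp [pvStepA]
    rw [hstep, ih]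
    simp

-- main invariant: on paren-only strings A's stack-length equals B's normal-form length
theorem pv_main : ∀ l : List Char, (∀ c ∈ l, c = '(' ∨ c = ')') →
    (List.foldl pvStepA [] l).length = (pvReduce l).length := by
  intro l
  induction l using pvReduce.induct with
  | case1 l h ih =>
    intro hall
    rw [pvReduce, dif_pos h, ← foldlA_pvRepl l []]
    exact ih (fun c hc => hall c (pvRepl_subset l c hc))
  | case2 l h =>
    intro hall
    rw [pvReduce, dif_neg h]
    obtain ⟨a, b, hab⟩ := noPair_shape l hall (by simpa using h)
    subst hab
    rw [List.foldl_append]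
    have h1 := foldlA_closes a 0
    simp only [List.replicate_zero, Nat.zero_add] at h1
    rw [h1, foldlA_opens b]

-- ===== VERDICT (by name: the statement is the Claim_ definition above) =====
theorem countInvalidParenthesis_spec : Claim_equal_countInvalidParenthesis := by
  intro s _ hpre
  unfold Spec_countInvalidParenthesis countInvalidParenthesis countInvalidParenthesis_alt
  have hall : ∀ c ∈ s.toList, c = '(' ∨ c = ')' := by
    intro c hc
    have := List.all_eq_true.mp hpre c hc
    simpa using this
  exact_mod_cast pv_main s.toList hall
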